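-- pv_equiv track=rewrite | github.com/drizztSun/common_project | PythonLeetcode/Leetcode/656_CoinPath.py | doit_dp
-- ===== SOURCE A (Python) =====
-- def doit_dp(A, B):
--
--     N = len(A)
--     dp = [-1 for _ in range(N)]
--     path = [-1 for _ in range(N)]
--     dp[-1] = A[-1]
--
--     for i in range(N-2, -1, -1):
--         if A[i] == -1:
--             continue
--
--         for j in range(i + 1, min(len(A), i + B + 1)):
--             if dp[j] == -1:
--                 continue
--
--             if dp[i] == -1 or dp[i] > dp[j]:
--                 dp[i] = dp[j]
--                 path[i] = j
--
--         dp[i] += A[i]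
--
--     i, res = 0, []
--     while 0 <= i < len(A):
--         res.append(i+1)
--         i = path[i]
--
--     if res[-1] != len(A):
--         return []
--
--     return res
-- ===== SOURCE B (Python) =====
-- def doit_dp(A, B):
--     # Sliding-window minimum via a monotonic deque (list + head pointer):
--     # O(N) instead of A's O(N*B) nested scan; same dp recurrence and tie-breaking.
--     N = len(A)
--     dp = [-1] * N
--     path = [-1] * N
--     dp[N - 1] = A[N - 1]
--     buf = []   # monotonic structure; buf[h:] is the live deque, buf[h] = window minimum
--     h = 0
--     for i in range(N - 2, -1, -1):
--         v = dp[i + 1]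
--         if v != -1:
--             # new smallest index wins ties -> pop stored entries with value >= v
--             while len(buf) > h and buf[-1][1] >= v:
--                 buf.pop()
--             buf.append((i + 1, v))
--         while h < len(buf) and buf[h][0] > i + B:
--             h += 1
--         if A[i] == -1:
--             continue
--         if h < len(buf):
--             dp[i] = buf[h][1] + A[i]
--             path[i] = buf[h][0]
--         else:
--             dp[i] = A[i] - 1   # window minimum defaults to -1 in the recurrence
--     i, res = 0, []
--     while 0 <= i < N:
--         res.append(i + 1)
--         i = path[i]
--     return res if res[-1] == N else []
-- ===== Notes on version B (the rewrite author's own statement) =====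
-- stated objective: faster
-- what changed: Replaces A's O(B) rescan of the jump window at every index with a monotonic-deque sliding-window minimum (list + head pointer), keeping A's exact dp recurrence and smallest-index tie-breaking.
import Mathlib
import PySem

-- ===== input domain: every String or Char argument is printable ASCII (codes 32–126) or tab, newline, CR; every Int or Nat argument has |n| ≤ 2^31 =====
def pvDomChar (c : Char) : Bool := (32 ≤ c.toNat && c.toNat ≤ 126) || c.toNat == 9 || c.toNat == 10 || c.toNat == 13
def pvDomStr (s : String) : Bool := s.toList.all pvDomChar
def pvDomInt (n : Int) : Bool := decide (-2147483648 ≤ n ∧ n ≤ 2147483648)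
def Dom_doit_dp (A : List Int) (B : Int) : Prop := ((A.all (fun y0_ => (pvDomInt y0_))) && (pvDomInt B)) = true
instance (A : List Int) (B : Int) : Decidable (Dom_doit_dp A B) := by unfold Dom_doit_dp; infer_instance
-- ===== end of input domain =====

-- B replaces A's O(B) rescan of the jump window at each index by a monotonic-deque
-- sliding-window minimum (list + head pointer); same dp recurrence, same tie-breaking.

-- python indexing xs[i] (used only where Python cannot raise; default irrelevant there)
def gI (xs : List Int) (i : Int) : Int := PySem.List.pyGetD xs i 0

-- ===== PORT A =====
-- one step of the inner loop body: j-th candidate updates (dp[i], path[i])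
def stepA (dp : List Int) (st : Int × Int) (j : Int) : Int × Int :=
  let dpj := gI dp j
  if dpj = -1 then st
  else if st.1 = -1 ∨ st.1 > dpj then (dpj, j) else st

-- inner loop: for j in range(i+1, min(len(A), i+B+1)): ... (state = (dp[i], path[i]))
def innerA (dp : List Int) (lo hi : Int) (st : Int × Int) : Int × Int :=
  (PySem.List.pyRange lo hi 1).foldl (stepA dp) st

-- outer loop: for i in range(N-2, -1, -1); fuel k means indices i = k-1, k-2, …, 0 remain
def loopA (Ar : List Int) (B : Int) : Nat → List Int → List Int → List Int × List Int
  | 0, dp, path => (dp, path)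
  | k+1, dp, path =>
    if gI Ar k = -1 then loopA Ar B k dp path
    else
      let st := innerA dp ((k : Int)+1) (min ((Ar.length : Int)) ((k : Int)+B+1)) (gI dp k, gI path k)
      loopA Ar B k (dp.set k (st.1 + gI Ar k)) (path.set k st.2)

-- while 0 <= i < len(A): res.append(i+1); i = path[i]   (path strictly increases, so
-- fuel N+1 is never exhausted on states this program reaches)
def walkRes (path : List Int) (n : Int) : Nat → Int → List Int → List Int
  | 0, _, res => res
  | f+1, i, res => if 0 ≤ i ∧ i < n then walkRes path n f (gI path i) (res ++ [i+1]) else res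

def doit_dp (A : List Int) (B : Int) : List Int :=
  let N := A.length
  let dp := (List.replicate N (-1 : Int)).set (N-1) (gI A (-1))
  let path := List.replicate N (-1 : Int)
  let dppath := loopA A B (N-1) dp path
  let res := walkRes dppath.2 (N : Int) (N+1) 0 []
  if gI res (-1) = (N : Int) then res else []

-- ===== PORT B =====
-- while len(buf) > h and buf[-1][1] >= v: buf.pop()
def popDom (h : Nat) (v : Int) (buf : List (Int × Int)) : List (Int × Int) :=
  if _hc : h < buf.length ∧ v ≤ ((buf.getLast?).getD (0, 0)).2 then popDom h v buf.dropLast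
  else buf
termination_by buf.length
decreasing_by
  have : buf ≠ [] := by intro h0; rw [h0] at _hc; simp at _hc
  simp [List.length_dropLast]; omega

-- while h < len(buf) and buf[h][0] > i + B: h += 1
def skipExp (buf : List (Int × Int)) (lim : Int) (h : Nat) : Nat :=
  if hc : h < buf.length ∧ lim < (buf.getD h (0, 0)).1 then skipExp buf lim (h+1) else h
termination_by buf.length - h

-- for i in range(N-2, -1, -1) with the monotonic structure (buf, h)
def loopB (Ar : List Int) (B : Int) : Nat → List Int → List Int → List (Int × Int) → Nat → List Int × List Int
  | 0, dp, path, _, _ => (dp, path)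
  | k+1, dp, path, buf, h =>
    let v := gI dp ((k : Int)+1)
    let buf1 := if v = -1 then buf else popDom h v buf ++ [((k : Int)+1, v)]
    let h1 := skipExp buf1 ((k : Int) + B) h
    if gI Ar k = -1 then loopB Ar B k dp path buf1 h1
    else if h1 < buf1.length then
      let e := buf1.getD h1 (0, 0)
      loopB Ar B k (dp.set k (e.2 + gI Ar k)) (path.set k e.1) buf1 h1
    else
      loopB Ar B k (dp.set k (gI Ar k - 1)) path buf1 h1

def doit_dp_alt (A : List Int) (B : Int) : List Int :=
  let N := A.length
  let dp := (List.replicate N (-1 : Int)).set (N-1) (gI A ((N : Int) - 1))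
  let path := List.replicate N (-1 : Int)
  let dppath := loopB A B (N-1) dp path [] 0
  let res := walkRes dppath.2 (N : Int) (N+1) 0 []
  if gI res (-1) = (N : Int) then res else []

-- ===== PRECONDITION & SPEC =====
-- Pre_ excludes only the empty list, on which both Pythons raise IndexError (A[-1]).
def Pre_doit_dp (A : List Int) (B : Int) : Prop := A ≠ []
instance (A : List Int) (B : Int) : Decidable (Pre_doit_dp A B) := by unfold Pre_doit_dp; infer_instance
def pvWitness_doit_dp : List Int × Int := ([1, 2, -1, 1], 2)

def Spec_doit_dp (A : List Int) (B : Int) (out : List Int) : Prop := out = doit_dp_alt A B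
instance (A : List Int) (B : Int) (out : List Int) : Decidable (Spec_doit_dp A B out) := by unfold Spec_doit_dp; infer_instance

-- ===== CLAIM (what is proved, stated in full; the proofs are below) =====
def Claim_equal_doit_dp : Prop := ∀ (A : List Int) (B : Int), Dom_doit_dp A B → Pre_doit_dp A B → Spec_doit_dp A B (doit_dp A B)

-- ===== LEMMAS AND PROOFS =====

-- the "staircase": surviving window entries, largest index (= window minimum) first
def winOK (dpf : Int → Int) (lo j : Int) : Bool :=
  (dpf j != -1) && (PySem.List.pyRange lo j 1).all (fun t => dpf t == -1 || dpf j < dpf t)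

def winStair (dpf : Int → Int) (lo hi : Int) : List (Int × Int) :=
  (((PySem.List.pyRange lo (hi+1) 1).filter (winOK dpf lo)).reverse).map (fun j => (j, dpf j))

theorem winStair_nil (dpf : Int → Int) (lo hi : Int) (h : hi < lo) : winStair dpf lo hi = [] := by
  unfold winStair
  rw [PySem.List.pyRange_one_eq_nil (by omega)]
  rfl

theorem mem_winStair (dpf : Int → Int) (lo hi : Int) (e : Int × Int) (he : e ∈ winStair dpf lo hi) :
    lo ≤ e.1 ∧ e.1 ≤ hi ∧ e.2 = dpf e.1 ∧ winOK dpf lo e.1 = true := by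
  unfold winStair at he
  obtain ⟨j, hj, rfl⟩ := List.mem_map.mp he
  rw [List.mem_reverse, List.mem_filter] at hj
  have hr := PySem.List.mem_pyRange_one.mp hj.1
  exact ⟨by omega, by omega, rfl, hj.2⟩


theorem dropWhile_eq_self_of_all {a : Type} (p : a → Bool) (l : List a)
    (h : ∀ x ∈ l, p x = false) : l.dropWhile p = l := by
  cases l with
  | nil => rfl
  | cons x t => rw [List.dropWhile_cons, h x (by simp)]
                simp

theorem winStair_pairwise (dpf : Int → Int) (lo hi : Int) :
    List.Pairwise (fun a b : Int × Int => a.2 < b.2) (winStair dpf lo hi) := by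
  unfold winStair
  rw [List.pairwise_map, List.pairwise_reverse]
  have hlt : List.Pairwise (fun a b : Int => a < b)
      ((PySem.List.pyRange lo (hi+1) 1).filter (winOK dpf lo)) :=
    (PySem.List.pairwise_lt_pyRange_one lo (hi+1)).sublist List.filter_sublist
  refine hlt.imp_of_mem ?_
  intro a b ha hb hab
  rw [List.mem_filter] at ha hb
  have hb2 := hb.2
  unfold winOK at hb2
  rw [Bool.and_eq_true, List.all_eq_true] at hb2
  have hta : a ∈ PySem.List.pyRange lo b 1 := by
    rw [PySem.List.mem_pyRange_one]
    have := PySem.List.mem_pyRange_one.mp ha.1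
    exact ⟨this.1, hab⟩
  have := hb2.2 a hta
  rw [Bool.or_eq_true] at this
  have ha2 := ha.2
  unfold winOK at ha2
  rw [Bool.and_eq_true] at ha2
  rcases this with h1 | h1
  · exfalso; exact (by simpa using ha2.1 : dpf a ≠ -1) (by simpa using h1)
  · simpa using h1

theorem winOK_self (dpf : Int → Int) (lo : Int) :
    winOK dpf lo lo = (dpf lo != -1) := by
  unfold winOK
  rw [PySem.List.pyRange_one_eq_nil (le_refl lo)]
  simp

theorem winOK_step (dpf : Int → Int) (lo j : Int) (h : lo < j) :
    winOK dpf lo j = (winOK dpf (lo+1) j && ((dpf lo == -1) || decide (dpf j < dpf lo))) := by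
  unfold winOK
  rw [PySem.List.pyRange_one_cons h, List.all_cons]
  cases h1 : (dpf j != -1) <;> cases h2 : (dpf lo == -1) <;>
    cases h3 : decide (dpf j < dpf lo) <;>
    cases h4 : (PySem.List.pyRange (lo+1) j 1).all (fun t => dpf t == -1 || decide (dpf j < dpf t)) <;>
    simp_all

theorem filter_eq_takeWhile_mono (c : Int) (l : List (Int × Int))
    (hp : List.Pairwise (fun a b : Int × Int => a.2 < b.2) l) :
    l.filter (fun e => decide (e.2 < c)) = l.takeWhile (fun e => decide (e.2 < c)) := by
  induction l with
  | nil => rfl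
  | cons a t ih =>
    rw [List.filter_cons, List.takeWhile_cons]
    rcases List.pairwise_cons.mp hp with ⟨ha, ht⟩
    by_cases hac : a.2 < c
    · simp only [hac, decide_true, if_pos]
      rw [ih ht]
    · simp only [hac, decide_false]
      rw [if_neg (by simp), if_neg (by simp)]
      rw [List.filter_eq_nil_iff.mpr]
      intro x hx
      have := ha x hx
      simp; omega

theorem winStair_insert (dpf : Int → Int) (lo hi : Int) (h : lo ≤ hi) :
    winStair dpf lo hi =
      if dpf lo = -1 then winStair dpf (lo+1) hi
      else (winStair dpf (lo+1) hi).takeWhile (fun e => decide (e.2 < dpf lo)) ++ [(lo, dpf lo)] := by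
  have htail : (PySem.List.pyRange (lo+1) (hi+1) 1).filter (winOK dpf lo)
      = ((PySem.List.pyRange (lo+1) (hi+1) 1).filter (winOK dpf (lo+1))).filter
          (fun j => (dpf lo == -1) || decide (dpf j < dpf lo)) := by
    rw [List.filter_filter]
    apply List.filter_congr
    intro j hj
    have hj' := PySem.List.mem_pyRange_one.mp hj
    rw [winOK_step dpf lo j (by omega)]
    cases hA : winOK dpf (lo+1) j <;> cases hB : ((dpf lo == -1) || decide (dpf j < dpf lo)) <;>
      simp_all
  have hsplit : (PySem.List.pyRange lo (hi+1) 1).filter (winOK dpf lo)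
      = (if winOK dpf lo lo then [lo] else []) ++
        ((PySem.List.pyRange (lo+1) (hi+1) 1).filter (winOK dpf (lo+1))).filter
          (fun j => (dpf lo == -1) || decide (dpf j < dpf lo)) := by
    rw [PySem.List.pyRange_one_cons (by omega : lo < hi+1), List.filter_cons, htail]
    split <;> rfl
  by_cases hlo : dpf lo = -1
  · rw [if_pos hlo]
    unfold winStair
    rw [hsplit, winOK_self]
    have : (dpf lo != -1) = false := by simp [hlo]
    rw [this]
    have : (fun j : Int => (dpf lo == -1) || decide (dpf j < dpf lo)) = fun _ => true := by
      funext j; simp [hlo]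
    rw [this, List.filter_eq_self.mpr (fun _ _ => rfl)]
    rw [if_neg (by simp)]
    rw [List.nil_append]
  · rw [if_neg hlo]
    unfold winStair
    rw [hsplit, winOK_self]
    have hne : (dpf lo != -1) = true := by simp [hlo]
    rw [hne]
    have hq : (fun j : Int => (dpf lo == -1) || decide (dpf j < dpf lo))
        = fun j => decide (dpf j < dpf lo) := by
      funext j; simp [hlo]
    rw [hq]
    rw [if_pos rfl, List.reverse_append, List.map_append]
    congr 1
    · rw [← List.filter_reverse]
      rw [show (fun j : Int => decide (dpf j < dpf lo))
            = ((fun e : Int × Int => decide (e.2 < dpf lo)) ∘ (fun j : Int => (j, dpf j))) from rfl]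
      rw [← List.filter_map]
      exact filter_eq_takeWhile_mono (dpf lo) _ (winStair_pairwise dpf (lo+1) hi)

theorem winStair_expire (dpf : Int → Int) (lo hi lim : Int) :
    (winStair dpf lo hi).dropWhile (fun e => decide (lim < e.1)) = winStair dpf lo (min hi lim) := by
  by_cases h1 : hi ≤ lim
  · rw [min_eq_left (by omega)]
    apply dropWhile_eq_self_of_all
    intro e he
    have := mem_winStair dpf lo hi e he
    simp; omega
  · by_cases h2 : lim < lo
    · rw [winStair_nil dpf lo (min hi lim) (by omega)]
      rw [List.dropWhile_eq_nil_iff.mpr]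
      intro e he
      have := mem_winStair dpf lo hi e (by simpa using he)
      simp; omega
    · -- lo ≤ lim < hi : split the range at lim+1
      have hmin : min hi lim = lim := by omega
      rw [hmin]
      unfold winStair
      rw [PySem.List.pyRange_one_append lo (lim+1) (hi+1) (by omega) (by omega)]
      rw [List.filter_append, List.reverse_append, List.map_append]
      rw [List.dropWhile_append]
      have hHi : (((PySem.List.pyRange (lim+1) (hi+1) 1).filter (winOK dpf lo)).reverse.map
          (fun j => (j, dpf j))).dropWhile (fun e => decide (lim < e.1)) = [] := by
        rw [List.dropWhile_eq_nil_iff]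
        intro e he
        obtain ⟨j, hj, rfl⟩ := List.mem_map.mp he
        rw [List.mem_reverse, List.mem_filter] at hj
        have := PySem.List.mem_pyRange_one.mp hj.1
        simp; omega
      rw [hHi]
      simp only [List.isEmpty_nil, if_true]
      apply dropWhile_eq_self_of_all
      intro e he
      obtain ⟨j, hj, rfl⟩ := List.mem_map.mp he
      rw [List.mem_reverse, List.mem_filter] at hj
      have := PySem.List.mem_pyRange_one.mp hj.1
      simp; omega

theorem winOK_congr (dpf dpf' : Int → Int) (lo j : Int)
    (hj : dpf j = dpf' j) (h : ∀ t, lo ≤ t → t < j → dpf t = dpf' t) :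
    winOK dpf lo j = winOK dpf' lo j := by
  unfold winOK
  rw [hj]
  congr 1
  rw [Bool.eq_iff_iff, List.all_eq_true, List.all_eq_true]
  constructor <;> intro hall t ht <;>
    · have hr := PySem.List.mem_pyRange_one.mp ht
      have := hall t ht
      rw [h t hr.1 hr.2] at *
      simpa using this

theorem winStair_congr (dpf dpf' : Int → Int) (lo hi : Int)
    (h : ∀ j, lo ≤ j → j ≤ hi → dpf j = dpf' j) :
    winStair dpf lo hi = winStair dpf' lo hi := by
  unfold winStair
  have hf : (PySem.List.pyRange lo (hi+1) 1).filter (winOK dpf lo)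
      = (PySem.List.pyRange lo (hi+1) 1).filter (winOK dpf' lo) := by
    apply List.filter_congr
    intro j hj
    have hr := PySem.List.mem_pyRange_one.mp hj
    exact winOK_congr dpf dpf' lo j (h j hr.1 (by omega)) (fun t ht1 ht2 => h t ht1 (by omega))
  rw [hf]
  apply List.map_congr_left
  intro j hj
  rw [List.mem_reverse, List.mem_filter] at hj
  have hr := PySem.List.mem_pyRange_one.mp hj.1
  rw [h j hr.1 (by omega)]

-- the value the inner scan produces, read off the staircase
def ansOf (st : Int × Int) (S : List (Int × Int)) : Int × Int :=
  match S with
  | [] => st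
  | e :: _ => if st.1 = -1 ∨ e.2 < st.1 then (e.2, e.1) else st

theorem innerA_eq (dp : List Int) (hi : Int) (lo0 : Int) (st0 : Int × Int) :
    innerA dp lo0 hi st0 = ansOf st0 (winStair (gI dp) lo0 (hi-1)) := by
  suffices H : ∀ (n : Nat) (lo : Int) (st : Int × Int), (hi - lo).toNat = n →
      innerA dp lo hi st = ansOf st (winStair (gI dp) lo (hi-1)) by exact H _ lo0 st0 rfl
  intro n
  induction n with
  | zero =>
    intro lo st h0
    unfold innerA
    rw [PySem.List.pyRange_one_eq_nil (by omega), winStair_nil _ _ _ (by omega)]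
    rfl
  | succ n ih =>
    intro lo st h0
    have hlt : lo < hi := by omega
    have key : innerA dp lo hi st = innerA dp (lo+1) hi (stepA dp st lo) := by
      unfold innerA
      rw [PySem.List.pyRange_one_cons hlt, List.foldl_cons]
    rw [key, ih (lo+1) _ (by omega), winStair_insert (gI dp) lo (hi-1) (by omega)]
    by_cases hv : gI dp lo = -1
    · rw [if_pos hv]
      have hst : stepA dp st lo = st := by unfold stepA; rw [if_pos hv]
      rw [hst]
    · rw [if_neg hv]
      by_cases hc : st.1 = -1 ∨ st.1 > gI dp lo
      · have hst : stepA dp st lo = (gI dp lo, lo) := by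
          unfold stepA; rw [if_neg hv, if_pos hc]
        rw [hst]
        cases hS : winStair (gI dp) (lo+1) (hi-1) with
        | nil =>
          simp only [List.takeWhile_nil, List.nil_append]
          simp only [ansOf]
          split_ifs <;> rfl
        | cons e rest =>
          by_cases he : e.2 < gI dp lo
          · rw [List.takeWhile_cons, if_pos (by simpa using he)]
            simp only [List.cons_append]
            simp only [ansOf]
            split_ifs <;> first | rfl | (exfalso; omega)
          · rw [List.takeWhile_cons, if_neg (by simpa using he)]
            simp only [List.nil_append]
            simp only [ansOf]
            split_ifs <;> first | rfl | (exfalso; omega)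
      · have hst : stepA dp st lo = st := by
          unfold stepA; rw [if_neg hv, if_neg hc]
        rw [hst]
        cases hS : winStair (gI dp) (lo+1) (hi-1) with
        | nil =>
          simp only [List.takeWhile_nil, List.nil_append]
          simp only [ansOf]
          split_ifs <;> first | rfl | (exfalso; omega)
        | cons e rest =>
          by_cases he : e.2 < gI dp lo
          · rw [List.takeWhile_cons, if_pos (by simpa using he)]
            simp only [List.cons_append, ansOf]
          · rw [List.takeWhile_cons, if_neg (by simpa using he)]
            simp only [List.nil_append]
            simp only [ansOf]
            split_ifs <;> first | rfl | (exfalso; omega)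

theorem takeWhile_concat_of_neg {A : Type} (p : A → Bool) (l : List A) (a : A)
    (h : p a = false) : (l ++ [a]).takeWhile p = l.takeWhile p := by
  rw [List.takeWhile_append]
  split
  · next hlen =>
    rw [(List.takeWhile_prefix p).eq_of_length hlen]
    simp [h]
  · rfl

theorem popDom_eq (v : Int) (buf0 : List (Int × Int)) (h0 : Nat) (hh0 : h0 ≤ buf0.length)
    (hp0 : List.Pairwise (fun a b : Int × Int => a.2 < b.2) (buf0.drop h0)) :
    popDom h0 v buf0 = buf0.take h0 ++ (buf0.drop h0).takeWhile (fun e => decide (e.2 < v)) := by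
  suffices H : ∀ (n : Nat) (buf : List (Int × Int)) (h : Nat), buf.length ≤ n → h ≤ buf.length →
      List.Pairwise (fun a b : Int × Int => a.2 < b.2) (buf.drop h) →
      popDom h v buf = buf.take h ++ (buf.drop h).takeWhile (fun e => decide (e.2 < v)) by
    exact H buf0.length buf0 h0 (le_refl _) hh0 hp0
  intro n
  induction n with
  | zero =>
    intro buf h hn hh hp
    have : buf = [] := List.length_eq_zero_iff.mp (by omega)
    subst this
    have : h = 0 := by simpa using hh
    subst this
    rw [popDom]
    simp
  | succ n ih =>
    intro buf h hn hh hp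
    rw [popDom]
    by_cases hc : h < buf.length ∧ v ≤ ((buf.getLast?).getD (0, 0)).2
    · rw [dif_pos hc]
      have hne : buf ≠ [] := by intro h0; rw [h0] at hc; simp at hc
      have hlast : (buf.getLast?).getD (0, 0) = buf.getLast hne := by
        rw [List.getLast?_eq_some_getLast hne]; rfl
      have hdl : buf.dropLast.drop h = (buf.drop h).dropLast := by
        rw [List.dropLast_eq_take, List.drop_take, List.dropLast_eq_take, List.length_drop]
        congr 1
        omega
      have hrec := ih buf.dropLast h (by rw [List.length_dropLast]; omega)
        (by rw [List.length_dropLast]; omega)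
        (by rw [hdl]; exact hp.sublist (List.dropLast_sublist _))
      rw [hrec]
      congr 1
      · rw [List.dropLast_eq_take, List.take_take]
        congr 1
        omega
      · rw [hdl]
        have hSne : buf.drop h ≠ [] := by
          intro h0
          have := congrArg List.length h0
          rw [List.length_drop] at this
          simp at this
          omega
        conv_rhs => rw [← List.dropLast_concat_getLast hSne]
        rw [takeWhile_concat_of_neg]
        rw [List.getLast_drop hSne]
        have hv2 := hc.2
        rw [hlast] at hv2
        simp
        omega
    · rw [dif_neg hc]
      by_cases h1 : h < buf.length
      · have hSne : buf.drop h ≠ [] := by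
          intro h0
          have := congrArg List.length h0
          rw [List.length_drop] at this
          simp at this
          omega
        have hlast : (buf.getLast?).getD (0, 0) = (buf.drop h).getLast hSne := by
          rw [List.getLast_drop hSne]
          have hne : buf ≠ [] := by intro h0; rw [h0] at h1; simp at h1
          rw [List.getLast?_eq_some_getLast hne]; rfl
        have hv2 : ((buf.getLast?).getD (0, 0)).2 < v := by
          rcases not_and_or.mp hc with hbad | hlt
          · exact absurd h1 hbad
          · omega
        rw [List.takeWhile_eq_self_iff.mpr, List.take_append_drop]
        intro e he
        rw [hlast] at hv2
        simp only [decide_eq_true_eq]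
        conv at he => rw [← List.dropLast_concat_getLast hSne]
        rcases List.mem_append.mp he with hmem | hmem
        · have hdec : buf.drop h = (buf.drop h).dropLast ++ [(buf.drop h).getLast hSne] :=
            (List.dropLast_concat_getLast hSne).symm
          have hpw := hp
          rw [hdec, List.pairwise_append] at hpw
          have := hpw.2.2 e hmem ((buf.drop h).getLast hSne) (by simp)
          omega
        · have he2 : e = (buf.drop h).getLast hSne := by simpa using hmem
          rw [he2]
          omega
      · have hh2 : buf.length ≤ h := by omega
        rw [List.drop_eq_nil_of_le hh2]
        simp [List.take_of_length_le (by omega : buf.length ≤ h)]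

theorem skipExp_drop (buf : List (Int × Int)) (lim : Int) (h0 : Nat) :
    buf.drop (skipExp buf lim h0) = (buf.drop h0).dropWhile (fun e => decide (lim < e.1)) ∧
      (h0 ≤ buf.length → skipExp buf lim h0 ≤ buf.length) := by
  suffices H : ∀ (n : Nat) (h : Nat), buf.length - h ≤ n →
      buf.drop (skipExp buf lim h) = (buf.drop h).dropWhile (fun e => decide (lim < e.1)) ∧
      (h ≤ buf.length → skipExp buf lim h ≤ buf.length) from H _ h0 (le_refl _)
  intro n
  induction n with
  | zero =>
    intro h hn
    have hh : buf.length ≤ h := by omega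
    rw [skipExp]
    rw [dif_neg (by intro hcc; omega)]
    rw [List.drop_eq_nil_of_le hh]
    exact ⟨rfl, fun hle => by omega⟩
  | succ n ih =>
    intro h hn
    rw [skipExp]
    by_cases hc : h < buf.length ∧ lim < (buf.getD h (0, 0)).1
    · rw [dif_pos hc]
      have hcons : buf.drop h = buf[h] :: buf.drop (h+1) := List.drop_eq_getElem_cons hc.1
      have hget : buf.getD h (0, 0) = buf[h] := List.getD_eq_getElem _ _ hc.1
      rw [hcons, List.dropWhile_cons]
      rw [if_pos (by rw [hget] at hc; simpa using hc.2)]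
      exact ⟨(ih (h+1) (by omega)).1, fun _ => (ih (h+1) (by omega)).2 (by omega)⟩
    · rw [dif_neg hc]
      refine ⟨?_, fun hle => hle⟩
      by_cases h1 : h < buf.length
      · have hcons : buf.drop h = buf[h] :: buf.drop (h+1) := List.drop_eq_getElem_cons h1
        have hget : buf.getD h (0, 0) = buf[h] := List.getD_eq_getElem _ _ h1
        rw [hcons, List.dropWhile_cons, if_neg]
        have : ¬ lim < (buf.getD h (0, 0)).1 := by
          rcases not_and_or.mp hc with hbad | hlt
          · exact absurd h1 hbad
          · exact hlt
        rw [hget] at this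
        simpa using this
      · rw [List.drop_eq_nil_of_le (by omega)]
        rfl

theorem gI_natCast (l : List Int) (t : Nat) (ht : t < l.length) : gI l (t : Int) = l[t] := by
  unfold gI
  rw [PySem.List.pyGetD_natCast, List.getD_eq_getElem l 0 ht]

theorem gI_set_ne (l : List Int) (k : Nat) (x : Int) (j : Int) (h0 : 0 ≤ j)
    (hne : j ≠ (k : Int)) : gI (l.set k x) j = gI l j := by
  obtain ⟨n, rfl⟩ : ∃ n : Nat, j = (n : Int) := ⟨j.toNat, (Int.toNat_of_nonneg h0).symm⟩
  unfold gI
  rw [PySem.List.pyGetD_natCast, PySem.List.pyGetD_natCast,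
    List.getD_eq_getElem?_getD, List.getD_eq_getElem?_getD,
    List.getElem?_set_ne (by omega : k ≠ n)]

theorem loop_eq (Ar : List Int) (B : Int) (k : Nat) (dp path : List Int)
    (buf : List (Int × Int)) (h : Nat)
    (hdp : dp.length = Ar.length) (hpa : path.length = Ar.length)
    (hk : k + 1 ≤ Ar.length)
    (hlow : ∀ t : Nat, t < k → gI dp (t : Int) = -1)
    (hpath : ∀ t : Nat, t < k → gI path (t : Int) = -1)
    (hh : h ≤ buf.length)
    (hS : buf.drop h = winStair (gI dp) ((k : Int)+1) (min ((Ar.length : Int)-1) ((k : Int)+B))) :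
    loopA Ar B k dp path = loopB Ar B k dp path buf h := by
  induction k generalizing dp path buf h with
  | zero => rfl
  | succ k ihk =>
    have hlen2 : k + 2 ≤ Ar.length := hk
    have hNI : (k : Int) + 1 ≤ (Ar.length : Int) - 1 := by omega
    push_cast at hS
    simp only [loopA, loopB]
    set v := gI dp ((k : Int)+1) with hv_def
    set buf1 := if v = -1 then buf else popDom h v buf ++ [((k : Int)+1, v)] with hbuf1
    set himid := max (min ((Ar.length : Int)-1) ((k : Int)+1+B)) ((k : Int)+1) with himid_def
    have hShi : winStair (gI dp) ((k : Int)+2) (min ((Ar.length : Int)-1) ((k : Int)+1+B))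
        = winStair (gI dp) ((k : Int)+2) himid := by
      by_cases hcc : (k : Int)+1 ≤ min ((Ar.length : Int)-1) ((k : Int)+1+B)
      · congr 1
        omega
      · rw [winStair_nil _ _ _ (by omega), winStair_nil _ _ _ (by omega)]
    have hplus : (k : Int) + 1 + 1 = (k : Int) + 2 := by ring
    have hS' : buf.drop h = winStair (gI dp) ((k : Int)+2) himid := by
      rw [← hShi, ← hplus]
      exact hS
    have hmid : buf1.drop h = winStair (gI dp) ((k : Int)+1) himid := by
      rw [winStair_insert (gI dp) ((k : Int)+1) himid (by omega), hplus]
      by_cases hv : v = -1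
      · rw [hbuf1, if_pos hv, if_pos hv]
        exact hS'
      · rw [hbuf1, if_neg hv, if_neg hv]
        rw [popDom_eq v buf h hh (by rw [hS']; exact winStair_pairwise _ _ _)]
        have hlt : (buf.take h).length = h := by rw [List.length_take]; omega
        rw [List.append_assoc, List.drop_left' hlt, hS']
    have hh1 : h ≤ buf1.length := by
      rw [hbuf1]
      by_cases hv : v = -1
      · rw [if_pos hv]; exact hh
      · rw [if_neg hv, popDom_eq v buf h hh (by rw [hS']; exact winStair_pairwise _ _ _)]
        have hlt : (buf.take h).length = h := by rw [List.length_take]; omega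
        rw [List.append_assoc, List.length_append, hlt]
        omega
    obtain ⟨hsk1, hsk2⟩ := skipExp_drop buf1 ((k : Int) + B) h
    set h1 := skipExp buf1 ((k : Int) + B) h with h1_def
    have hS1 : buf1.drop h1 = winStair (gI dp) ((k : Int)+1)
        (min ((Ar.length : Int)-1) ((k : Int)+B)) := by
      rw [hsk1, hmid, winStair_expire]
      congr 1
      omega
    have hh1' : h1 ≤ buf1.length := hsk2 hh1
    by_cases hA : gI Ar (k : Int) = -1
    · rw [if_pos hA, if_pos hA]
      exact ihk dp path buf1 h1 hdp hpa (by omega) (fun t ht => hlow t (by omega))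
        (fun t ht => hpath t (by omega)) hh1' hS1
    · rw [if_neg hA, if_neg hA]
      have hklen : k < Ar.length := by omega
      have hdpk : gI dp (k : Int) = -1 := hlow k (by omega)
      have hpathk : gI path (k : Int) = -1 := hpath k (by omega)
      have harg : min ((Ar.length : Int)) ((k : Int)+B+1) - 1
          = min ((Ar.length : Int)-1) ((k : Int)+B) := by omega
      have hin := innerA_eq dp (min ((Ar.length : Int)) ((k : Int)+B+1)) ((k : Int)+1)
        (gI dp (k : Int), gI path (k : Int))
      rw [harg] at hin
      rw [hin, hdpk, hpathk]
      cases hS1c : winStair (gI dp) ((k : Int)+1) (min ((Ar.length : Int)-1) ((k : Int)+B)) with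
      | nil =>
        rw [hS1c] at hS1
        have hempty : buf1.length ≤ h1 := by
          by_contra hcon
          have := List.drop_eq_nil_iff.mp hS1
          omega
        rw [if_neg (by omega)]
        simp only [ansOf]
        have e1 : (-1 : Int) + gI Ar (k : Int) = gI Ar (k : Int) - 1 := by ring
        rw [e1]
        have hpk : path[k] = (-1 : Int) := by
          rw [← gI_natCast path k (by omega)]
          exact hpathk
        rw [show path.set k (-1 : Int) = path by rw [← hpk]; exact List.set_getElem_self (by omega)]
        refine ihk (dp.set k (gI Ar (k : Int) - 1)) path buf1 h1 (by rw [List.length_set]; exact hdp)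
          hpa (by omega) ?_ (fun t ht => hpath t (by omega)) hh1' ?_
        · intro t ht
          rw [gI_set_ne dp k _ _ (by omega) (by omega)]
          exact hlow t (by omega)
        · rw [hS1, ← hS1c]
          exact (winStair_congr _ _ _ _ (fun j hj1 hj2 =>
            (gI_set_ne dp k _ j (by omega) (by omega)))).symm
      | cons e rest =>
        rw [hS1c] at hS1
        have hnonempty : h1 < buf1.length := by
          by_contra hcon
          rw [List.drop_eq_nil_of_le (by omega)] at hS1
          exact (List.cons_ne_nil e rest) hS1.symm
        rw [if_pos hnonempty]
        rw [show ansOf ((-1 : Int), (-1 : Int)) (e :: rest) = (e.2, e.1) by simp [ansOf]]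
        have hget : buf1.getD h1 (0, 0) = e := by
          rw [List.getD_eq_getElem?_getD, ← List.head?_drop, hS1]
          rfl
        rw [hget]
        refine ihk (dp.set k (e.2 + gI Ar (k : Int))) (path.set k e.1) buf1 h1
          (by rw [List.length_set]; exact hdp) (by rw [List.length_set]; exact hpa)
          (by omega) ?_ ?_ hh1' ?_
        · intro t ht
          rw [gI_set_ne dp k _ _ (by omega) (by omega)]
          exact hlow t (by omega)
        · intro t ht
          rw [gI_set_ne path k _ _ (by omega) (by omega)]
          exact hpath t (by omega)
        · rw [hS1, ← hS1c]
          exact (winStair_congr _ _ _ _ (fun j hj1 hj2 =>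
            (gI_set_ne dp k _ j (by omega) (by omega)))).symm

-- ===== VERDICT (by name: the statement is the Claim_ definition above) =====
theorem doit_dp_spec : Claim_equal_doit_dp := by
  intro A B hdom hpre
  unfold Spec_doit_dp
  simp only [doit_dp, doit_dp_alt]
  have hN : 0 < A.length := List.length_pos_iff.mpr hpre
  have hlenset : ((List.replicate A.length (-1 : Int)).set (A.length - 1)
      (gI A ((A.length : Int) - 1))).length = A.length := by simp
  have hlenrep : (List.replicate A.length (-1 : Int)).length = A.length := by simp
  have hinit : gI A (-1) = gI A ((A.length : Int) - 1) := by
    unfold gI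
    have hc : ((A.length : Int) - 1) = ((A.length - 1 : Nat) : Int) := by omega
    rw [hc, PySem.List.pyGetD_natCast, List.getD_eq_getElem A 0 (by omega)]
    rw [show (-1 : Int) = -((1 : Nat) : Int) by norm_num]
    rw [PySem.List.pyGetD_neg_natCast A 1 0 (by norm_num) (by omega)]
  rw [hinit]
  have hloop := loop_eq A B (A.length - 1)
    ((List.replicate A.length (-1 : Int)).set (A.length - 1) (gI A ((A.length : Int) - 1)))
    (List.replicate A.length (-1 : Int)) [] 0
    (by rw [hlenset])
    (by rw [hlenrep])
    (by omega)
    (by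
      intro t ht
      rw [gI_natCast _ t (by simp only [List.length_set, List.length_replicate]; omega)]
      rw [List.getElem_set_ne (by omega) (by simp only [List.length_set, List.length_replicate]; omega)]
      exact List.getElem_replicate (by omega))
    (by
      intro t ht
      rw [gI_natCast _ t (by simp only [List.length_replicate]; omega)]
      exact List.getElem_replicate (by omega))
    (by simp)
    (by
      rw [winStair_nil]
      · rfl
      · have : ((A.length - 1 : Nat) : Int) = (A.length : Int) - 1 := by omega
        rw [this]
        omega)
  rw [hloop]
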